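-- pv_equiv track=rewrite | github.com/zsturdevant/Williams-projects | voting.py | leastVotes
-- ===== SOURCE A (Python) =====
-- def leastVotes(votes, candidates):
--     ''' Takes a set of ballots or list of votes and returns the candidate
--     or candidates with the lowest number of votes and returs them.
--
--     >>> leastVotes(['Aamir', 'Beth', 'Chris', 'Aamir'], ['Aamir', 'Beth', 'Chris'])
--     ['Beth', 'Chris']
--     >>> leastVotes(['Abe', 'Abe', 'Betsy', 'Betsy', 'Carmen', 'Dave', 'Eva', 'Frida', 'Frida'], ['Abe', 'Betsy', 'Carmen', 'Dave', 'Eva', 'Frida'])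
--     ['Carmen', 'Dave', 'Eva']
--     >>> leastVotes(['Abe', 'Betsy', 'Betsy'], ['Abe', 'Betsy', 'Carmen'])
--     ['Carmen']
--     >>> leastVotes(firstChoiceVotes(readBallot('data/simple.csv')),candidates(readBallot('data/simple.csv')))
--     ['Chris', 'Beth']
--     >>> leastVotes(firstChoiceVotes(readBallot('data/characters.csv')),candidates(readBallot('data/characters.csv')))
--     ['Harry Potter', 'Elizabeth Bennet']
--     '''
--     voteCount = len(votes)
--     least = []
--     for name in candidates:#takes name of cantadate
--         count = votes.count(name)#counts number of appearances
--         if count < voteCount: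
--             voteCount = count
--             least = [name] #assigns name of person with lowest votes to least
--         elif count == voteCount:
--             least.append(name) #adds any ties to least
--     return least
-- ===== SOURCE B (Python) =====
-- def leastVotes(votes, candidates):
--     if not candidates:
--         return []
--     counts = {c: votes.count(c) for c in candidates}
--     m = min(counts.values())
--     return [c for c in candidates if counts[c] == m]
-- ===== Notes on version B (the rewrite author's own statement) =====
-- stated objective: simpler
-- what changed: Replaces A's single running-min/reset/append scan with a count table built once, a min over its values, and a filter of the original candidate list.
import Mathlib
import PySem

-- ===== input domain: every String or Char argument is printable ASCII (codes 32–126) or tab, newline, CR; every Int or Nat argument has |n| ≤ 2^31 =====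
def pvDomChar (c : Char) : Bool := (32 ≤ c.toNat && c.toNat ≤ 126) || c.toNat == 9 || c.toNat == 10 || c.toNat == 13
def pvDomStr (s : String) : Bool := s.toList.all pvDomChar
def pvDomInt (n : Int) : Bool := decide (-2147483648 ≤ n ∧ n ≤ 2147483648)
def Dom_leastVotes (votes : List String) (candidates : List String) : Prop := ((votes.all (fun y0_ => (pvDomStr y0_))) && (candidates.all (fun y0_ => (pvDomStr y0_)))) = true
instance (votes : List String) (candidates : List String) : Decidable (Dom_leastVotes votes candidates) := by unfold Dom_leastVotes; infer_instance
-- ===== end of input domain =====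

-- B replaces A's running-min/reset/append scan by a count table, a min over its values, and a filter of the candidate list (objective: simpler decomposition, same cost).


-- ===== PORT A =====
def leastVotes (votes : List String) (candidates : List String) : List String :=
  (candidates.foldl
    (fun (st : Int × List String) name =>
      let count : Int := (PySem.List.count votes name : Int)
      if count < st.1 then (count, [name])
      else if count = st.1 then (st.1, st.2 ++ [name])
      else st)
    ((votes.length : Int), ([] : List String))).2

-- ===== PORT B =====
-- 'counts = {c: votes.count(c) for c in candidates}' as a helper (named local variable in Source B)
def countsTable (votes : List String) (candidates : List String) : PySem.Dict String Int :=
  candidates.foldl (fun d c => d.insert c ((PySem.List.count votes c : Int))) PySem.Dict.empty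

def leastVotes_alt (votes : List String) (candidates : List String) : List String :=
  if candidates = [] then []
  else
    match PySem.List.min? (PySem.Dict.values (countsTable votes candidates)) (fun x => x) with
    | some m => candidates.filter (fun c => PySem.Dict.getD (countsTable votes candidates) c 0 = m)
    | none => []  -- unreachable: candidates ≠ [] makes the values list nonempty

-- ===== PRECONDITION & SPEC =====
def Spec_leastVotes (votes : List String) (candidates : List String) (out : List String) : Prop := out = leastVotes_alt votes candidates
instance (votes : List String) (candidates : List String) (out : List String) : Decidable (Spec_leastVotes votes candidates out) := by unfold Spec_leastVotes; infer_instance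

-- ===== CLAIM (what is proved, stated in full; the proofs are below) =====
def Claim_equal_leastVotes : Prop := ∀ (votes : List String) (candidates : List String), Dom_leastVotes votes candidates → Spec_leastVotes votes candidates (leastVotes votes candidates)

-- ===== LEMMAS AND PROOFS =====

-- A's loop: the running min ends at the overall min of the counts (and the initial len(votes)),
-- and `least` ends as the filter of the processed list at that overall min.
lemma foldA_char (votes : List String) (l : List String) (m : Int) (acc : List String) :
    l.foldl
      (fun (st : Int × List String) name =>
        let count : Int := (PySem.List.count votes name : Int)
        if count < st.1 then (count, [name])
        else if count = st.1 then (st.1, st.2 ++ [name])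
        else st)
      (m, acc)
    = (l.foldl (fun a c => min a ((PySem.List.count votes c : Int))) m,
       (if l.foldl (fun a c => min a ((PySem.List.count votes c : Int))) m = m then acc else [])
         ++ l.filter (fun c => (PySem.List.count votes c : Int) = l.foldl (fun a c => min a ((PySem.List.count votes c : Int))) m)) := by
  simp only [PySem.List.count_eq]
  induction l generalizing m acc with
  | nil => simp
  | cons c t ih =>
    have hmin : ∀ a : Int, t.foldl (fun a c => min a ((List.count c votes : Int))) a ≤ a := by
      intro a
      have := (PySem.List.foldl_min_le (t.map (fun c => (List.count c votes : Int))) a).1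
      simpa [List.foldl_map] using this
    simp only [List.foldl_cons]
    by_cases h1 : (List.count c votes : Int) < m
    · rw [if_pos h1, ih]
      have hm : min m ((List.count c votes : Int)) = (List.count c votes : Int) := by omega
      have hMle := hmin ((List.count c votes : Int))
      simp only [hm, List.filter_cons, decide_eq_true_eq]
      clear ih hmin hm
      split_ifs with hA hB hB <;> first | (exfalso; omega) | rfl
    · rw [if_neg h1]
      by_cases h2 : (List.count c votes : Int) = m
      · rw [if_pos h2, ih]
        have hm : min m ((List.count c votes : Int)) = m := by omega
        simp only [hm, List.filter_cons, decide_eq_true_eq]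
        clear ih hmin hm
        split_ifs with hA hB hB <;> first | (exfalso; omega) | rfl | (simp; try rfl)
      · rw [if_neg h2, ih]
        have hm : min m ((List.count c votes : Int)) = m := by omega
        have hMle := hmin m
        simp only [hm, List.filter_cons, decide_eq_true_eq]
        clear ih hmin hm
        split_ifs with hA hB hB <;> first | (exfalso; omega) | rfl

-- B's table: looking up any listed candidate returns its count.
lemma getD_foldB (votes : List String) (l : List String) (d : PySem.Dict String Int) (x : String) :
    (l.foldl (fun d c => d.insert c ((PySem.List.count votes c : Int))) d).getD x 0
      = if x ∈ l then (PySem.List.count votes x : Int) else d.getD x 0 := by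
  induction l generalizing d with
  | nil => simp
  | cons c t ih =>
    simp only [List.foldl_cons, ih, PySem.Dict.getD_insert, List.mem_cons]
    by_cases hx : x ∈ t <;> by_cases hc : x = c <;> simp [hx, hc]

theorem leastVotes_spec_aux (votes : List String) (candidates : List String) :
    leastVotes votes candidates = leastVotes_alt votes candidates := by
  by_cases hc : candidates = []
  · subst hc; simp [leastVotes, leastVotes_alt]
  · unfold leastVotes leastVotes_alt
    rw [foldA_char, if_neg hc]
    set cnt : String → Int := fun c => (PySem.List.count votes c : Int) with hcnt
    set M : Int := candidates.foldl (fun a c => min a (cnt c)) (votes.length : Int) with hMdef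
    set counts : PySem.Dict String Int := countsTable votes candidates with hcounts
    have hnodup : counts.keys.Nodup :=
      PySem.Dict.nodup_keys_foldl_insert candidates (fun d c => cnt c) PySem.Dict.empty
        PySem.Dict.nodup_keys_empty
    have hkeys : counts.keys = PySem.Set.ofList candidates := by
      rw [hcounts, countsTable, PySem.Dict.keys_foldl_insert]
      simp [PySem.Dict.keys_empty, PySem.Set.update, PySem.Set.ofList_eq_foldl]
    have hget : ∀ x ∈ candidates, counts.getD x 0 = cnt x := by
      intro x hx
      rw [hcounts, countsTable, getD_foldB, if_pos hx]
    have hvals : counts.values = counts.keys.map (fun k => counts.getD k 0) :=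
      PySem.Dict.values_eq_map_keys counts hnodup 0
    have hvne : PySem.Dict.values counts ≠ [] := by
      obtain ⟨c0, t0, rfl⟩ := List.exists_cons_of_ne_nil hc
      have hk : c0 ∈ counts.keys := by
        rw [hkeys]; exact (PySem.Set.mem_ofList _ _).mpr (List.mem_cons_self ..)
      have : counts.getD c0 0 ∈ counts.values := by
        rw [hvals]; exact List.mem_map_of_mem hk
      exact List.ne_nil_of_mem this
    obtain ⟨m, hm⟩ : ∃ m, PySem.List.min? (PySem.Dict.values counts) (fun x => x) = some m := by
      cases h : PySem.List.min? (PySem.Dict.values counts) (fun x => x) with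
      | none => exact absurd ((PySem.List.min?_eq_none_iff _ _).mp h) hvne
      | some m => exact ⟨m, rfl⟩
    rw [hm]
    have hmmem := PySem.List.min?_mem hm
    rw [hvals] at hmmem
    obtain ⟨k, hk, hkm⟩ := List.mem_map.mp hmmem
    rw [hkeys, PySem.Set.mem_ofList] at hk
    have hmval : m = cnt k := by rw [← hkm, hget k hk]
    have hlow : ∀ c ∈ candidates, m ≤ cnt c := by
      intro c hcc
      have hkc : c ∈ counts.keys := by rw [hkeys]; exact (PySem.Set.mem_ofList _ _).mpr hcc
      have hv : counts.getD c 0 ∈ counts.values := by rw [hvals]; exact List.mem_map_of_mem hkc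
      have := PySem.List.min?_isMin hm _ hv
      simpa [hget c hcc] using this
    have hfm : ∀ (a : Int), candidates.foldl (fun a c => min a (cnt c)) a
        = (candidates.map cnt).foldl min a := by
      intro a; rw [List.foldl_map]
    have hMle := PySem.List.foldl_min_le (candidates.map cnt) (votes.length : Int)
    rw [← hfm, ← hMdef] at hMle
    have hMlow : ∀ c ∈ candidates, M ≤ cnt c := by
      intro c hcc; exact hMle.2 _ (List.mem_map_of_mem hcc)
    have hMmem := PySem.List.foldl_min_mem (candidates.map cnt) (votes.length : Int)
    rw [← hfm, ← hMdef] at hMmem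
    obtain ⟨c0, hc0, hc0M⟩ : ∃ c0 ∈ candidates, M = cnt c0 := by
      rcases hMmem with h | h
      · obtain ⟨c0, t0, rfl⟩ := List.exists_cons_of_ne_nil hc
        have h1 : M ≤ cnt c0 := hMlow c0 (List.mem_cons_self ..)
        have h2 : cnt c0 ≤ (votes.length : Int) := by
          simp only [hcnt, PySem.List.count_eq]
          exact_mod_cast List.count_le_length
        exact ⟨c0, List.mem_cons_self .., by omega⟩
      · obtain ⟨c0, hc0, hc0M⟩ := List.mem_map.mp h
        exact ⟨c0, hc0, hc0M.symm⟩
    have hmM : m = M := by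
      have h1 : m ≤ M := by rw [hc0M]; exact hlow c0 hc0
      have h2 : M ≤ m := by rw [hmval]; exact hMlow k hk
      omega
    have : (if M = (votes.length : Int) then ([] : List String) else []) = [] := by
      split <;> rfl
    rw [this, List.nil_append]
    apply List.filter_congr
    intro c hcc
    simp [hget c hcc, hmM, hcnt, PySem.List.count_eq]

-- ===== VERDICT (by name: the statement is the Claim_ definition above) =====
theorem leastVotes_spec : Claim_equal_leastVotes := by
  intro votes candidates _
  exact leastVotes_spec_aux votes candidates
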